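-- pv_equiv track=rewrite | github.com/AdrianGroty/darkdraw | darkdraw/ansi2ddw.py | format_color_string
-- ===== SOURCE A (Python) =====
-- def format_color_string(color_str: str) -> str:
--     """Format the color string to match expected format: 'fg on bg bold'."""
--     if not color_str.strip():
--         return ""
--
--     parts = color_str.split()
--     fg_color = ""
--     bg_color = ""
--     has_bold = False
--
--     for part in parts:
--         if part == "bold":
--             has_bold = True
--         elif "on" in part:
--             # This is a "color on bg_color" format
--             sub_parts = part.split(" on ")
--             if len(sub_parts) == 2:
--                 fg_color = sub_parts[0] if sub_parts[0] != "on" else fg_color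
--                 bg_color = sub_parts[1]
--             elif part.startswith("on "):
--                 bg_color = part[3:]  # Remove "on " prefix
--         elif part.isdigit():
--             # Assume first number is foreground, second might be background
--             if not fg_color:
--                 fg_color = part
--             elif not bg_color:
--                 bg_color = part  # If there's already a fg, treat as bg
--         elif part.startswith("on"):
--             # Handle "onN" format
--             bg_color = part[2:]  # Remove "on" prefix
--
--     # Build the formatted string
--     result_parts = []
--     if fg_color:
--         result_parts.append(fg_color)
--     if bg_color:
--         result_parts.append("on")
--         result_parts.append(bg_color)
--     if has_bold:
--         result_parts.append("bold")
--
--     return " ".join(result_parts)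
-- ===== SOURCE B (Python) =====
-- def format_color_string(color_str: str) -> str:
--     """Format the color string to match expected format: 'fg on bg bold'."""
--     parts = color_str.split()
--     digits = [p for p in parts if p.isdigit()]
--     out = []
--     if digits:
--         out.append(digits[0])
--     if len(digits) > 1:
--         out += ["on", digits[1]]
--     if "bold" in parts:
--         out.append("bold")
--     return " ".join(out)
-- ===== Notes on version B (the rewrite author's own statement) =====
-- stated objective: simpler
-- what changed: Replaces A's single stateful loop with mutable fg/bg/bold state (including branches unreachable because whitespace-split parts contain no spaces) by a declarative filter of the digit tokens plus an independent membership test for the bold keyword, indexing the first two digits directly; the leading strip-guard is dropped since an empty split yields the empty join anyway.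
import Mathlib
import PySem

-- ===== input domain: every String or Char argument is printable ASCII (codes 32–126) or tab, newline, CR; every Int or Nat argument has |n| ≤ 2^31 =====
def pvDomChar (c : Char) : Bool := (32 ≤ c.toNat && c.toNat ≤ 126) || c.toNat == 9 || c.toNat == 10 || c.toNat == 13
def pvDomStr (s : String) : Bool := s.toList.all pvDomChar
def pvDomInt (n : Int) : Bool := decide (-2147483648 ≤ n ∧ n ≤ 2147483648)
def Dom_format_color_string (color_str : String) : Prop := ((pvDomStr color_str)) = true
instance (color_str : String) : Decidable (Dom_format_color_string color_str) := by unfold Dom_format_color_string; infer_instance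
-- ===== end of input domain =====

-- B is a simpler decomposition: A's single stateful loop becomes a filter of the digit
-- tokens plus an independent membership test; return values agree on all inputs.

-- ===== PORT A =====
-- the loop body of A: state (fg_color, bg_color, has_bold), branches in A's order
def fcsStepA (st : List Char × List Char × Bool) (part : List Char) :
    List Char × List Char × Bool :=
  match st with
  | (fg, bg, hb) =>
    if part = "bold".toList then (fg, bg, true)
    else if PySem.Chars.isIn "on".toList part then
      -- part.split(" on ")
      let subParts := PySem.Chars.splitOn part " on ".toList
      if subParts.length = 2 then
        (if subParts.getD 0 [] ≠ "on".toList then subParts.getD 0 [] else fg,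
         subParts.getD 1 [], hb)
      else if PySem.Chars.startswith part "on ".toList then
        (fg, PySem.Chars.slice part (some 3) none, hb)
      else (fg, bg, hb)
    else if PySem.Chars.strIsdigit part then
      if fg = [] then (part, bg, hb)
      else if bg = [] then (fg, part, hb)
      else (fg, bg, hb)
    else if PySem.Chars.startswith part "on".toList then
      (fg, PySem.Chars.slice part (some 2) none, hb)
    else (fg, bg, hb)

def format_color_string (color_str : String) : String :=
  if PySem.Chars.strip color_str.toList = [] then ""
  else
    let parts := PySem.Chars.split₀ color_str.toList
    match parts.foldl fcsStepA ([], [], false) with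
    | (fg, bg, hb) =>
      let rp := (if fg ≠ [] then [fg] else []) ++
                (if bg ≠ [] then ["on".toList, bg] else []) ++
                (if hb then ["bold".toList] else [])
      String.ofList (PySem.Chars.join " ".toList rp)

-- ===== PORT B =====
def format_color_string_alt (color_str : String) : String :=
  let parts := PySem.Chars.split₀ color_str.toList
  let digits := parts.filter PySem.Chars.strIsdigit
  let out := (if digits ≠ [] then [digits.getD 0 []] else []) ++
             (if 1 < digits.length then ["on".toList, digits.getD 1 []] else []) ++
             (if parts.contains "bold".toList then ["bold".toList] else [])
  String.ofList (PySem.Chars.join " ".toList out)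

-- ===== PRECONDITION & SPEC =====
def Spec_format_color_string (color_str : String) (out : String) : Prop := out = format_color_string_alt color_str
instance (color_str : String) (out : String) : Decidable (Spec_format_color_string color_str out) := by unfold Spec_format_color_string; infer_instance

-- ===== CLAIM (what is proved, stated in full; the proofs are below) =====
def Claim_equal_format_color_string : Prop := ∀ (color_str : String), Dom_format_color_string color_str → Spec_format_color_string color_str (format_color_string color_str)

-- ===== LEMMAS AND PROOFS =====

-- elements of split() contain no space character
theorem split0_go_no_space (s : List Char) : ∀ (cur : List Char) (acc : List (List Char)),
    (∀ q ∈ acc, ' ' ∉ q) → (' ' ∉ cur) →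
    ∀ p ∈ PySem.Chars.split₀.go s cur acc, ' ' ∉ p := by
  induction s with
  | nil =>
    intro cur acc hacc hcur p hp
    simp [PySem.Chars.split₀.go] at hp
    split at hp
    · simp at hp; exact hacc p hp
    · simp at hp
      rcases hp with hp | hp
      · exact hacc p hp
      · subst hp; simpa using hcur
  | cons c rest ih =>
    intro cur acc hacc hcur p hp
    simp only [PySem.Chars.split₀.go] at hp
    split at hp
    · split at hp
      · exact ih [] acc hacc (by simp) p hp
      · refine ih [] (cur.reverse :: acc) ?_ (by simp) p hp
        intro q hq
        rcases List.mem_cons.mp hq with h | h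
        · subst h; simpa using hcur
        · exact hacc q h
    · rename_i hcs
      refine ih (c :: cur) acc hacc ?_ p hp
      intro hmem
      rcases List.mem_cons.mp hmem with h | h
      · subst h; simp [PySem.Chars.isspace] at hcs
      · exact hcur h

theorem split0_no_space (cs : List Char) :
    ∀ p ∈ PySem.Chars.split₀ cs, ' ' ∉ p :=
  split0_go_no_space cs [] [] (by simp) (by simp)

-- a separator that is not an infix of the remaining input never splits it
theorem splitOn_go_not_infix (sep : List Char) :
    ∀ (fuel : Nat) (l cur : List Char) (acc : List (List Char)), ¬ sep <:+: l →
    PySem.Chars.splitOn.go sep fuel l cur acc = ((cur.reverse ++ l) :: acc).reverse := by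
  intro fuel
  induction fuel with
  | zero => intro l cur acc h; simp [PySem.Chars.splitOn.go]
  | succ n ih =>
    intro l cur acc h
    match l with
    | [] => simp [PySem.Chars.splitOn.go]
    | c :: rest =>
      rw [PySem.Chars.splitOn.go]
      have hnp : sep.isPrefixOf (c :: rest) = false := by
        rw [Bool.eq_false_iff]; intro hp
        exact h ((List.isPrefixOf_iff_prefix.mp hp).isInfix)
      rw [hnp]
      simp only [Bool.false_eq_true, if_false]
      rw [ih rest (c :: cur) acc (fun hi => h (hi.trans (List.infix_cons (List.infix_rfl))))]
      simp

theorem splitOn_not_infix (s sep : List Char) (h : ¬ sep <:+: s) :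
    PySem.Chars.splitOn s sep = [s] := by
  rw [PySem.Chars.splitOn, splitOn_go_not_infix sep _ s [] [] h]; simp

-- a syntactically-digit token is nonempty, is not "bold" and does not contain "on"
theorem digit_facts (p : List Char) (h : PySem.Chars.strIsdigit p = true) :
    p ≠ [] ∧ p ≠ "bold".toList ∧ PySem.Chars.isIn "on".toList p = false := by
  simp only [PySem.Chars.strIsdigit, Bool.and_eq_true, List.all_eq_true] at h
  obtain ⟨hne, hall⟩ := h
  refine ⟨by simpa [List.isEmpty_iff] using hne, ?_, ?_⟩
  · intro hb
    have := hall 'b' (by rw [hb]; decide)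
    simp [PySem.Chars.isdigit] at this
  · rw [PySem.Chars.isIn_eq_false_iff]
    intro hin
    have := hall 'o' (hin.subset (by decide))
    simp [PySem.Chars.isdigit] at this

-- A's loop body is a no-op on any space-free part that is neither "bold" nor a digit token
theorem stepA_noop (st : List Char × List Char × Bool) (p : List Char)
    (hp : ' ' ∉ p) (hb : p ≠ "bold".toList) (hd : PySem.Chars.strIsdigit p = false) :
    fcsStepA st p = st := by
  obtain ⟨fg, bg, hbo⟩ := st
  rw [fcsStepA]
  rw [if_neg hb]
  by_cases hon : PySem.Chars.isIn "on".toList p = true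
  · rw [if_pos hon]
    have hni : ¬ (" on ".toList <:+: p) := fun hi => hp (hi.subset (by decide))
    rw [splitOn_not_infix p _ hni]
    have hst : PySem.Chars.startswith p ['o', 'n', ' '] = false := by
      rw [Bool.eq_false_iff]; intro hsw
      exact hp ((PySem.Chars.startswith_iff _ _).mp hsw |>.subset (by decide))
    simp [hst]
  · rw [if_neg hon, if_neg (by simp [hd]), if_neg ?_]
    rw [Bool.not_eq_true, Bool.eq_false_iff]
    intro hsw
    have : "on".toList <:+: p := ((PySem.Chars.startswith_iff _ _).mp hsw).isInfix
    exact hon (by rw [PySem.Chars.isIn_iff_infix]; exact this)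

theorem stepA_digit (fg bg : List Char) (hbo : Bool) (p : List Char)
    (hd : PySem.Chars.strIsdigit p = true) :
    fcsStepA (fg, bg, hbo) p =
      (if fg = [] then (p, bg, hbo) else if bg = [] then (fg, p, hbo) else (fg, bg, hbo)) := by
  obtain ⟨-, hb, hon⟩ := digit_facts p hd
  have hon' : PySem.Chars.isIn ['o', 'n'] p = false := hon
  rw [fcsStepA]
  rw [if_neg hb, if_neg (by simp [hon']), if_pos hd]

theorem stepA_bold (fg bg : List Char) (hbo : Bool) :
    fcsStepA (fg, bg, hbo) "bold".toList = (fg, bg, true) := by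
  rw [fcsStepA]; simp

-- A's loop, characterised by the filtered digit list and membership of "bold"
theorem loopA (parts : List (List Char)) (h : ∀ p ∈ parts, ' ' ∉ p) :
    ∀ (fg bg : List Char) (hb : Bool),
      parts.foldl fcsStepA (fg, bg, hb) =
        ((if fg = [] then (parts.filter PySem.Chars.strIsdigit).getD 0 [] else fg),
         (if fg = [] then (if bg = [] then (parts.filter PySem.Chars.strIsdigit).getD 1 [] else bg)
          else (if bg = [] then (parts.filter PySem.Chars.strIsdigit).getD 0 [] else bg)),
         hb || parts.contains "bold".toList) := by
  induction parts with
  | nil => intro fg bg hb; simp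
  | cons p rest ih =>
    intro fg bg hb
    have hp : ' ' ∉ p := h p (List.mem_cons_self ..)
    have hrest : ∀ q ∈ rest, ' ' ∉ q := fun q hq => h q (List.mem_cons_of_mem _ hq)
    rw [List.foldl_cons]
    by_cases hbp : p = "bold".toList
    · subst hbp
      rw [stepA_bold, ih hrest fg bg true]
      have hnd : PySem.Chars.strIsdigit ['b', 'o', 'l', 'd'] = false := by decide
      simp [List.filter_cons, hnd, List.contains_cons]
    · have hbp' : ¬ (['b', 'o', 'l', 'd'] = p) := fun e => hbp e.symm
      by_cases hd : PySem.Chars.strIsdigit p = true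
      · obtain ⟨hne, -, -⟩ := digit_facts p hd
        rw [stepA_digit fg bg hb p hd]
        by_cases hfg : fg = []
        · subst hfg
          rw [if_pos rfl, ih hrest p bg hb]
          simp [List.filter_cons, hd, hne, hbp, hbp', List.contains_cons]
        · rw [if_neg hfg]
          by_cases hbg : bg = []
          · subst hbg
            rw [if_pos rfl, ih hrest fg p hb]
            simp [List.filter_cons, hd, hne, hfg, hbp, hbp', List.contains_cons]
          · rw [if_neg hbg, ih hrest fg bg hb]
            simp [List.filter_cons, hd, hfg, hbg, hbp, hbp', List.contains_cons]
      · rw [Bool.not_eq_true] at hd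
        rw [stepA_noop (fg, bg, hb) p hp hbp hd, ih hrest fg bg hb]
        simp [List.filter_cons, hd, hbp', List.contains_cons]

theorem strip_nil_all_space (cs : List Char) (h : PySem.Chars.strip cs = []) :
    ∀ c ∈ cs, PySem.Chars.isspace c = true := by
  simp only [PySem.Chars.strip, PySem.Chars.rstrip, PySem.Chars.lstrip] at h
  intro c hc
  by_contra hns
  rw [Bool.not_eq_true] at hns
  have h1 : List.dropWhile PySem.Chars.isspace cs ≠ [] := by
    intro he
    have := List.dropWhile_eq_nil_iff.mp he c hc
    simp [hns] at this
  rw [List.reverse_eq_nil_iff] at h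
  have h2 := List.dropWhile_eq_nil_iff.mp h
  have hh := List.head_dropWhile_not PySem.Chars.isspace h1
  have hm : (List.dropWhile PySem.Chars.isspace cs).head h1 ∈
      (List.dropWhile PySem.Chars.isspace cs).reverse := by
    simpa using List.head_mem h1
  have := h2 _ hm
  simp [this] at hh

theorem split0_go_all_space (s : List Char) (h : ∀ c ∈ s, PySem.Chars.isspace c = true) :
    ∀ acc, PySem.Chars.split₀.go s [] acc = acc.reverse := by
  induction s with
  | nil => intro acc; simp [PySem.Chars.split₀.go]
  | cons c rest ih =>
    intro acc
    rw [PySem.Chars.split₀.go]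
    rw [h c (List.mem_cons_self ..)]
    simpa using ih (fun d hd => h d (List.mem_cons_of_mem _ hd)) acc

theorem strip_nil_split0_nil (cs : List Char) (h : PySem.Chars.strip cs = []) :
    PySem.Chars.split₀ cs = [] := by
  rw [PySem.Chars.split₀, split0_go_all_space cs (strip_nil_all_space cs h) []]
  rfl

theorem getD_ne_nil_iff (l : List (List Char)) (h : ∀ q ∈ l, q ≠ []) (i : Nat) :
    (l.getD i [] ≠ []) ↔ i < l.length := by
  constructor
  · intro hne
    by_contra hlt
    rw [Nat.not_lt] at hlt
    rw [List.getD_eq_default _ _ hlt] at hne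
    exact hne rfl
  · intro hlt
    rw [List.getD_eq_getElem _ _ hlt]
    exact h _ (List.getElem_mem hlt)

-- ===== VERDICT (by name: the statement is the Claim_ definition above) =====
theorem format_color_string_spec : Claim_equal_format_color_string := by
  intro cs _
  show format_color_string cs = format_color_string_alt cs
  rw [format_color_string, format_color_string_alt]
  by_cases hs : PySem.Chars.strip cs.toList = []
  · rw [if_pos hs, strip_nil_split0_nil _ hs]
    simp [PySem.Chars.join, List.intercalate]
  · rw [if_neg hs]
    simp only
    rw [loopA (PySem.Chars.split₀ cs.toList) (split0_no_space cs.toList) [] [] false]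
    have hne : ∀ q ∈ (PySem.Chars.split₀ cs.toList).filter PySem.Chars.strIsdigit, q ≠ [] :=
      fun q hq => (digit_facts q (List.of_mem_filter hq)).1
    simp only [if_true, Bool.false_or]
    simp only [getD_ne_nil_iff _ hne, List.length_pos_iff]
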